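-- pv_equiv track=rewrite | github.com/Noahmizhen/financial-data-cleaner | core/data_cleaner.py | _simple_vendor_category
-- ===== SOURCE A (Python) =====
-- def _simple_vendor_category(vendor: str) -> str:
--     """Simple vendor-to-category mapping."""
--     # Handle None values
--     if vendor is None:
--         return 'Other'
--
--     vendor = str(vendor).lower()
--
--     if any(term in vendor for term in ['spotify', 'netflix', 'adobe']):
--         return 'Software & Technology'
--     elif any(term in vendor for term in ['staples', 'office', 'supply']):
--         return 'Office Supplies'
--     elif any(term in vendor for term in ['uber', 'lyft', 'gas', 'fuel']):
--         return 'Travel & Transportation'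
--     elif any(term in vendor for term in ['restaurant', 'cafe', 'food']):
--         return 'Meals & Entertainment'
--     else:
--         return 'Other'
-- ===== SOURCE B (Python) =====
-- _CATEGORIES = ['Software & Technology', 'Office Supplies',
--                'Travel & Transportation', 'Meals & Entertainment']
--
-- _KEYWORD_PRIORITY = {
--     'spotify': 0, 'netflix': 0, 'adobe': 0,
--     'staples': 1, 'office': 1, 'supply': 1,
--     'uber': 2, 'lyft': 2, 'gas': 2, 'fuel': 2,
--     'restaurant': 3, 'cafe': 3, 'food': 3,
-- }
--
-- _KEYWORD_LENGTHS = [3, 4, 5, 6, 7, 10]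
--
--
-- def _simple_vendor_category(vendor: str) -> str:
--     """Simple vendor-to-category mapping via a sliding-window keyword index."""
--     if vendor is None:
--         return 'Other'
--     v = str(vendor).lower()
--     best = 4
--     for i in range(len(v)):
--         for n in _KEYWORD_LENGTHS:
--             p = _KEYWORD_PRIORITY.get(v[i:i + n], 4)
--             if p < best:
--                 best = p
--     return _CATEGORIES[best] if best < 4 else 'Other'
-- ===== Notes on version B (the rewrite author's own statement) =====
-- stated objective: alternative
-- what changed: Replaces the per-category keyword-membership ladder with a single sliding-window scan of the vendor string that looks each window up in a keyword-to-priority hash and keeps the minimum priority.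
import Mathlib
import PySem

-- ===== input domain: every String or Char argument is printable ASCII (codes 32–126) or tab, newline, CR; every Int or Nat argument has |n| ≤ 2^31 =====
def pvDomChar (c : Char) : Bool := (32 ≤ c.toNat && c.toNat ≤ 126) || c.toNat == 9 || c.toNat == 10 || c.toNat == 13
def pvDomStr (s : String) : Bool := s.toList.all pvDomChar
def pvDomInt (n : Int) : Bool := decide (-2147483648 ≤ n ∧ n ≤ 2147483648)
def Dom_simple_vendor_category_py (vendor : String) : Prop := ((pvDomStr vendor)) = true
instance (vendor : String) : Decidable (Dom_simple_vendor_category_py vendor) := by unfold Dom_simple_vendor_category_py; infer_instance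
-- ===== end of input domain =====

-- B replaces A's per-category keyword-membership ladder by a single sliding-window scan
-- of the vendor string against a keyword→priority hash, keeping the minimum priority
-- (objective: alternative). Return values agree on all strings.

-- ===== PORT A =====
-- Python `vendor` is typed str here, so the `vendor is None` guard cannot fire; the
-- port starts at `vendor = str(vendor).lower()`.
def simple_vendor_category_py (vendor : String) : String :=
  let v := PySem.Str.lower vendor
  if ["spotify", "netflix", "adobe"].any (fun t => PySem.Str.isIn t v) then
    "Software & Technology"
  else if ["staples", "office", "supply"].any (fun t => PySem.Str.isIn t v) then
    "Office Supplies"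
  else if ["uber", "lyft", "gas", "fuel"].any (fun t => PySem.Str.isIn t v) then
    "Travel & Transportation"
  else if ["restaurant", "cafe", "food"].any (fun t => PySem.Str.isIn t v) then
    "Meals & Entertainment"
  else
    "Other"

-- ===== PORT B =====
def categoriesB : List String :=
  ["Software & Technology", "Office Supplies", "Travel & Transportation", "Meals & Entertainment"]

def kwPairs : List (String × Int) :=
  [("spotify", 0), ("netflix", 0), ("adobe", 0),
   ("staples", 1), ("office", 1), ("supply", 1),
   ("uber", 2), ("lyft", 2), ("gas", 2), ("fuel", 2),
   ("restaurant", 3), ("cafe", 3), ("food", 3)]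

def kwPrio : PySem.Dict String Int := PySem.Dict.ofList kwPairs

def kwLens : List Int := [3, 4, 5, 6, 7, 10]

-- the nested `for i in range(len(v)): for n in _KEYWORD_LENGTHS:` loop of Source B
def bestPrio (v : String) : Int :=
  (PySem.List.pyRange 0 (PySem.Str.len v)).foldl
    (fun b i => kwLens.foldl
      (fun b n =>
        let p := kwPrio.getD (PySem.Str.slice v (some i) (some (i + n))) 4
        if p < b then p else b) b) 4

def simple_vendor_category_py_alt (vendor : String) : String :=
  let v := PySem.Str.lower vendor
  let best := bestPrio v
  if best < 4 then PySem.List.pyGetD categoriesB best "Other" else "Other"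

-- ===== PRECONDITION & SPEC =====
def Spec_simple_vendor_category_py (vendor : String) (out : String) : Prop := out = simple_vendor_category_py_alt vendor
instance (vendor : String) (out : String) : Decidable (Spec_simple_vendor_category_py vendor out) := by unfold Spec_simple_vendor_category_py; infer_instance

-- ===== CLAIM (what is proved, stated in full; the proofs are below) =====
def Claim_equal_simple_vendor_category_py : Prop := ∀ (vendor : String), Dom_simple_vendor_category_py vendor → Spec_simple_vendor_category_py vendor (simple_vendor_category_py vendor)

-- ===== LEMMAS AND PROOFS =====

-- the per-window priority lookup
def winPrio (v : String) (i n : Int) : Int :=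
  kwPrio.getD (PySem.Str.slice v (some i) (some (i + n))) 4

-- min-fold lemmas for the inner loop ('if p < b then p else b' keeps the minimum)
theorem fmin_le_init {α : Type} (f : α → Int) (xs : List α) (b : Int) :
    xs.foldl (fun b x => if f x < b then f x else b) b ≤ b := by
  induction xs generalizing b with
  | nil => simp
  | cons x xs ih =>
      simp only [List.foldl_cons]
      exact le_trans (ih _) (by split <;> omega)

theorem fmin_le_mem {α : Type} (f : α → Int) (xs : List α) (b : Int) {x : α} (hx : x ∈ xs) :
    xs.foldl (fun b x => if f x < b then f x else b) b ≤ f x := by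
  induction xs generalizing b with
  | nil => cases hx
  | cons y ys ih =>
      simp only [List.foldl_cons]
      rcases List.mem_cons.mp hx with rfl | hx'
      · exact le_trans (fmin_le_init f ys _) (by split <;> omega)
      · exact ih _ hx'

theorem fmin_cases {α : Type} (f : α → Int) (xs : List α) (b : Int) :
    xs.foldl (fun b x => if f x < b then f x else b) b = b ∨
      ∃ x ∈ xs, xs.foldl (fun b x => if f x < b then f x else b) b = f x := by
  induction xs generalizing b with
  | nil => exact Or.inl rfl
  | cons y ys ih =>
      simp only [List.foldl_cons]
      rcases ih (if f y < b then f y else b) with h | ⟨x, hx, h⟩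
      · by_cases hy : f y < b
        · exact Or.inr ⟨y, List.mem_cons_self, by rw [h, if_pos hy]⟩
        · exact Or.inl (by rw [h, if_neg hy])
      · exact Or.inr ⟨x, List.mem_cons_of_mem _ hx, h⟩

-- the inner loop as a function of the outer accumulator
def innerStep (v : String) (b i : Int) : Int :=
  kwLens.foldl
    (fun b n =>
      let p := kwPrio.getD (PySem.Str.slice v (some i) (some (i + n))) 4
      if p < b then p else b) b

theorem innerStep_eq (v : String) (b i : Int) :
    innerStep v b i = kwLens.foldl (fun b n => if winPrio v i n < b then winPrio v i n else b) b := rfl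

theorem bestPrio_eq (v : String) :
    bestPrio v = (PySem.List.pyRange 0 (PySem.Str.len v)).foldl (innerStep v) 4 := rfl

theorem outer_le_init (v : String) (is : List Int) (b : Int) :
    is.foldl (innerStep v) b ≤ b := by
  induction is generalizing b with
  | nil => simp
  | cons i is ih =>
      simp only [List.foldl_cons]
      exact le_trans (ih _) (by rw [innerStep_eq]; exact fmin_le_init _ _ _)

theorem outer_le_mem (v : String) (is : List Int) (b : Int) {i n : Int}
    (hi : i ∈ is) (hn : n ∈ kwLens) : is.foldl (innerStep v) b ≤ winPrio v i n := by
  induction is generalizing b with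
  | nil => cases hi
  | cons j js ih =>
      simp only [List.foldl_cons]
      rcases List.mem_cons.mp hi with rfl | hi'
      · exact le_trans (outer_le_init v js _) (by rw [innerStep_eq]; exact fmin_le_mem _ _ _ hn)
      · exact ih _ hi'

theorem outer_cases (v : String) (is : List Int) (b : Int) :
    is.foldl (innerStep v) b = b ∨
      ∃ i ∈ is, ∃ n ∈ kwLens, is.foldl (innerStep v) b = winPrio v i n := by
  induction is generalizing b with
  | nil => exact Or.inl rfl
  | cons j js ih =>
      simp only [List.foldl_cons]
      rcases ih (innerStep v b j) with h | ⟨i, hi, n, hn, h⟩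
      · rw [h, innerStep_eq]
        rcases fmin_cases (winPrio v j) kwLens b with h' | ⟨n, hn, h'⟩
        · exact Or.inl h'
        · exact Or.inr ⟨j, List.mem_cons_self, n, hn, h'⟩
      · exact Or.inr ⟨i, List.mem_cons_of_mem _ hi, n, hn, h⟩

-- dictionary facts
theorem getD_mem_list (pairs : List (String × Int)) (s : String) :
    ((PySem.Dict.mk pairs).get? s).getD 4 = 4 ∨
      (s, ((PySem.Dict.mk pairs).get? s).getD 4) ∈ pairs := by
  induction pairs with
  | nil => exact Or.inl rfl
  | cons kv rest ih =>
      obtain ⟨k, w⟩ := kv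
      rw [PySem.Dict.get?_mk_cons]
      by_cases h : (k == s) = true
      · have hk : k = s := by simpa using h
        subst hk
        simp
      · rw [if_neg h]
        rcases ih with h' | h'
        · exact Or.inl h'
        · exact Or.inr (List.mem_cons_of_mem _ h')

theorem getD_mem (s : String) : kwPrio.getD s 4 = 4 ∨ (s, kwPrio.getD s 4) ∈ kwPairs := by
  have hmk : kwPrio = PySem.Dict.mk kwPairs := rfl
  rw [hmk, PySem.Dict.getD_eq_get?_getD]
  exact getD_mem_list kwPairs s

theorem getD_nonneg (s : String) : 0 ≤ kwPrio.getD s 4 := by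
  rcases getD_mem s with h | h
  · omega
  · have hall : ∀ p ∈ kwPairs, 0 ≤ p.2 := by decide
    exact hall _ h

theorem getD_of_pair (t : String) (p : Int) (h : (t, p) ∈ kwPairs) : kwPrio.getD t 4 = p := by
  fin_cases h <;> decide

-- window ↔ infix
theorem slice_of_infix (v t : String) (h : t.toList <:+: v.toList) (hne : t.toList ≠ []) :
    ∃ i : Int, i ∈ PySem.List.pyRange 0 (PySem.Str.len v) ∧
      PySem.Str.slice v (some i) (some (i + (t.toList.length : Int))) = t := by
  obtain ⟨l1, l2, hv⟩ := h
  refine ⟨(l1.length : Int), ?_, ?_⟩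
  · rw [PySem.List.mem_pyRange_one]
    have hlen : v.toList.length = l1.length + t.toList.length + l2.length := by
      rw [← hv]; simp [List.length_append]; try omega
    have ht : 0 < t.toList.length := List.length_pos_iff.mpr hne
    rw [PySem.Str.len_eq]
    omega
  · apply String.ext
    show (PySem.Str.slice v _ _).toList = t.toList
    rw [PySem.Str.toList_slice, PySem.Chars.slice_eq_listSlice, PySem.List.slice_natCast_add,
      ← hv, List.append_assoc, List.drop_left, List.take_left']
    rfl

theorem infix_of_slice (v : String) (i n : Int) (h0 : 0 ≤ i) (hn : 0 ≤ n) :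
    (PySem.Str.slice v (some i) (some (i + n))).toList <:+: v.toList := by
  rw [PySem.Str.toList_slice, PySem.Chars.slice_eq_listSlice,
    PySem.List.slice_toNat _ h0 (by omega)]
  exact ((List.take_prefix _ _).isInfix).trans ((List.drop_suffix _ _).isInfix)

-- bestPrio characterization
theorem best_le (v t : String) (p : Int) (hm : (t, p) ∈ kwPairs)
    (hin : PySem.Str.isIn t v = true) : bestPrio v ≤ p := by
  rw [PySem.Str.isIn_iff_infix] at hin
  have hne : t.toList ≠ [] := by fin_cases hm <;> decide
  obtain ⟨i, hi, hslice⟩ := slice_of_infix v t hin hne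
  have hlen : ((t.toList.length : Nat) : Int) ∈ kwLens := by fin_cases hm <;> decide
  have hle := outer_le_mem v (PySem.List.pyRange 0 (PySem.Str.len v)) 4 hi hlen
  rw [bestPrio_eq]
  calc (PySem.List.pyRange 0 (PySem.Str.len v)).foldl (innerStep v) 4
      ≤ winPrio v i (t.toList.length : Int) := hle
    _ = p := by rw [winPrio, hslice]; exact getD_of_pair t p hm

theorem best_cases (v : String) :
    bestPrio v = 4 ∨ ∃ t p, (t, p) ∈ kwPairs ∧ bestPrio v = p ∧ PySem.Str.isIn t v = true := by
  rw [bestPrio_eq]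
  rcases outer_cases v (PySem.List.pyRange 0 (PySem.Str.len v)) 4 with h | ⟨i, hi, n, hn, h⟩
  · exact Or.inl h
  · rcases getD_mem (PySem.Str.slice v (some i) (some (i + n))) with h4 | hmem
    · exact Or.inl (by rw [h, winPrio, h4])
    · refine Or.inr ⟨_, _, hmem, by rw [h]; rfl, ?_⟩
      rw [PySem.Str.isIn_iff_infix]
      have h0 : 0 ≤ i := (PySem.List.mem_pyRange_one.mp hi).1
      have hn0 : 0 ≤ n := by fin_cases hn <;> decide
      exact infix_of_slice v i n h0 hn0

theorem best_nonneg (v : String) : 0 ≤ bestPrio v := by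
  rcases best_cases v with h | ⟨t, p, hm, hp, _⟩
  · omega
  · rw [hp, ← getD_of_pair t p hm]; exact getD_nonneg t

theorem best_le_four (v : String) : bestPrio v ≤ 4 := by
  rw [bestPrio_eq]; exact outer_le_init v _ 4

theorem best_ne_of (v : String) (k : Int) (hk : k ≠ 4)
    (h : ∀ t, (t, k) ∈ kwPairs → PySem.Str.isIn t v = false) : bestPrio v ≠ k := by
  intro heq
  rcases best_cases v with h4 | ⟨t, p, hm, hp, hin⟩
  · omega
  · rw [heq] at hp; subst hp
    rw [h t hm] at hin; cases hin

-- ===== VERDICT (by name: the statement is the Claim_ definition above) =====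
theorem simple_vendor_category_py_spec : Claim_equal_simple_vendor_category_py := by
  intro vendor _
  unfold Spec_simple_vendor_category_py simple_vendor_category_py simple_vendor_category_py_alt
  set v := PySem.Str.lower vendor with hv
  show _ = if bestPrio v < 4 then PySem.List.pyGetD categoriesB (bestPrio v) "Other" else "Other"
  have hb0 := best_nonneg v
  have hb4 := best_le_four v
  by_cases h1 : (["spotify", "netflix", "adobe"].any (fun t => PySem.Str.isIn t v)) = true
  · rcases List.any_eq_true.mp h1 with ⟨t, ht, hin⟩
    have hle : bestPrio v ≤ 0 := by
      fin_cases ht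
      · exact best_le v _ 0 (by decide) hin
      · exact best_le v _ 0 (by decide) hin
      · exact best_le v _ 0 (by decide) hin
    have hbp : bestPrio v = 0 := by omega
    rw [if_pos h1, hbp]
    decide
  · have h1' : ∀ t, (t, (0:Int)) ∈ kwPairs → PySem.Str.isIn t v = false := by
      have hstep := fun t ht => Bool.eq_false_iff.mpr
        (fun hc => h1 (List.any_eq_true.mpr ⟨t, ht, hc⟩))
      intro t ht
      simp only [kwPairs, List.mem_cons, List.not_mem_nil, Prod.mk.injEq, or_false] at ht
      norm_num at ht
      rcases ht with rfl | rfl | rfl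
      · exact hstep _ (by decide)
      · exact hstep _ (by decide)
      · exact hstep _ (by decide)
    have hne0 := best_ne_of v 0 (by omega) h1'
    rw [if_neg h1]
    by_cases h2 : (["staples", "office", "supply"].any (fun t => PySem.Str.isIn t v)) = true
    · rcases List.any_eq_true.mp h2 with ⟨t, ht, hin⟩
      have hle : bestPrio v ≤ 1 := by
        fin_cases ht
        · exact best_le v _ 1 (by decide) hin
        · exact best_le v _ 1 (by decide) hin
        · exact best_le v _ 1 (by decide) hin
      have hbp : bestPrio v = 1 := by omega
      rw [if_pos h2, hbp]
      decide
    · have h2' : ∀ t, (t, (1:Int)) ∈ kwPairs → PySem.Str.isIn t v = false := by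
        have hstep := fun t ht => Bool.eq_false_iff.mpr
          (fun hc => h2 (List.any_eq_true.mpr ⟨t, ht, hc⟩))
        intro t ht
        simp only [kwPairs, List.mem_cons, List.not_mem_nil, Prod.mk.injEq, or_false] at ht
        norm_num at ht
        rcases ht with rfl | rfl | rfl
        · exact hstep _ (by decide)
        · exact hstep _ (by decide)
        · exact hstep _ (by decide)
      have hne1 := best_ne_of v 1 (by omega) h2'
      rw [if_neg h2]
      by_cases h3 : (["uber", "lyft", "gas", "fuel"].any (fun t => PySem.Str.isIn t v)) = true
      · rcases List.any_eq_true.mp h3 with ⟨t, ht, hin⟩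
        have hle : bestPrio v ≤ 2 := by
          fin_cases ht
          · exact best_le v _ 2 (by decide) hin
          · exact best_le v _ 2 (by decide) hin
          · exact best_le v _ 2 (by decide) hin
          · exact best_le v _ 2 (by decide) hin
        have hbp : bestPrio v = 2 := by omega
        rw [if_pos h3, hbp]
        decide
      · have h3' : ∀ t, (t, (2:Int)) ∈ kwPairs → PySem.Str.isIn t v = false := by
          have hstep := fun t ht => Bool.eq_false_iff.mpr
            (fun hc => h3 (List.any_eq_true.mpr ⟨t, ht, hc⟩))
          intro t ht
          simp only [kwPairs, List.mem_cons, List.not_mem_nil, Prod.mk.injEq, or_false] at ht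
          norm_num at ht
          rcases ht with rfl | rfl | rfl | rfl
          · exact hstep _ (by decide)
          · exact hstep _ (by decide)
          · exact hstep _ (by decide)
          · exact hstep _ (by decide)
        have hne2 := best_ne_of v 2 (by omega) h3'
        rw [if_neg h3]
        by_cases h4 : (["restaurant", "cafe", "food"].any (fun t => PySem.Str.isIn t v)) = true
        · rcases List.any_eq_true.mp h4 with ⟨t, ht, hin⟩
          have hle : bestPrio v ≤ 3 := by
            fin_cases ht
            · exact best_le v _ 3 (by decide) hin
            · exact best_le v _ 3 (by decide) hin
            · exact best_le v _ 3 (by decide) hin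
          have hbp : bestPrio v = 3 := by omega
          rw [if_pos h4, hbp]
          decide
        · have h4' : ∀ t, (t, (3:Int)) ∈ kwPairs → PySem.Str.isIn t v = false := by
            have hstep := fun t ht => Bool.eq_false_iff.mpr
              (fun hc => h4 (List.any_eq_true.mpr ⟨t, ht, hc⟩))
            intro t ht
            simp only [kwPairs, List.mem_cons, List.not_mem_nil, Prod.mk.injEq, or_false] at ht
            norm_num at ht
            rcases ht with rfl | rfl | rfl
            · exact hstep _ (by decide)
            · exact hstep _ (by decide)
            · exact hstep _ (by decide)
          have hne3 := best_ne_of v 3 (by omega) h4'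
          have hbp : bestPrio v = 4 := by omega
          rw [if_neg h4, hbp]
          decide
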